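-- pv_equiv track=rewrite | github.com/harsh-chaudhary999/forge | tools/scan_forge/phase56.py | _strip_marker_blocks
-- ===== SOURCE A (Python) =====
-- def _strip_marker_blocks(text: str, begin: str, end: str) -> str:
--     lines = text.splitlines()
--     out: list[str] = []
--     i = 0
--     while i < len(lines):
--         if lines[i].strip() == begin:
--             i += 1
--             while i < len(lines) and lines[i].strip() != end:
--                 i += 1
--             if i < len(lines) and lines[i].strip() == end:
--                 i += 1
--             continue
--         out.append(lines[i])
--         i += 1
--     return "\n".join(out) + ("\n" if out else "")
-- ===== SOURCE B (Python) =====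
-- def _strip_marker_blocks(text: str, begin: str, end: str) -> str:
--     out = []
--     inside = False
--     for line in text.splitlines():
--         if inside:
--             if line.strip() == end:
--                 inside = False
--         elif line.strip() == begin:
--             inside = True
--         else:
--             out.append(line)
--     return "\n".join(out) + ("\n" if out else "")
-- ===== Notes on version B (the rewrite author's own statement) =====
-- stated objective: idiomatic
-- what changed: Replaced the index-based while loop with a nested skip-ahead inner while by a single flat for-loop over the lines maintaining a boolean inside-block flag.
import Mathlib
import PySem

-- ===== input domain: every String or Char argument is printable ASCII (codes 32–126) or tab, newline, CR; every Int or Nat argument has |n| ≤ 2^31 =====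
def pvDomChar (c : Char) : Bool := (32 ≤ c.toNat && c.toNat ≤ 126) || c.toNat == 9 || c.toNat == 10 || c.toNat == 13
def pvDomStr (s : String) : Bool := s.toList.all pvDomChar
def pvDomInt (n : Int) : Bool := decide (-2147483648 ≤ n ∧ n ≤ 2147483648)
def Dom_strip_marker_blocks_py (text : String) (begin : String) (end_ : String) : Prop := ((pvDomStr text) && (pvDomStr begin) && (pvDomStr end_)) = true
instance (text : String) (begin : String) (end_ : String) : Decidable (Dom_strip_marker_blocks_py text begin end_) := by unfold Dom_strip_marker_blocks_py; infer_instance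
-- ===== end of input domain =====

-- B replaces A's index-based while loop (with a nested inner skip-ahead while) by one flat
-- for-loop over the lines with a boolean inside-block flag; same cost, plainer shape.

-- ===== PORT A =====
-- the inner `while i < len(lines) and lines[i].strip() != end: i += 1` — returns the suffix
-- starting at the first line stripping to end_ (or [] when none)
def pvAInner (end_ : String) : List String → List String
  | [] => []
  | l :: rest => if ¬ (PySem.Str.strip l == end_) then pvAInner end_ rest else l :: rest

-- `if i < len(lines) and lines[i].strip() == end: i += 1` applied to the inner-while result
def pvAConsume (end_ : String) (ls : List String) : List String :=
  match pvAInner end_ ls with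
  | [] => []
  | l' :: rest' => if PySem.Str.strip l' == end_ then rest' else l' :: rest'

theorem pvAInner_len_le (end_ : String) (ls : List String) :
    (pvAInner end_ ls).length ≤ ls.length := by
  induction ls with
  | nil => simp [pvAInner]
  | cons x xs ih =>
    simp only [pvAInner]
    split
    · exact Nat.le_trans ih (Nat.le_succ _)
    · simp

theorem pvAConsume_len_le (end_ : String) (ls : List String) :
    (pvAConsume end_ ls).length ≤ ls.length := by
  unfold pvAConsume
  have h := pvAInner_len_le end_ ls
  cases hi : pvAInner end_ ls with
  | nil => simp
  | cons y ys =>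
    rw [hi] at h
    dsimp only
    split
    · simp_all
      omega
    · simp_all

-- A's outer while loop over the remaining lines
def pvALoop (begin end_ : String) : List String → List String
  | [] => []
  | l :: rest =>
    if PySem.Str.strip l == begin then
      -- `if i < len(lines) and lines[i].strip() == end: i += 1`
      pvALoop begin end_ (pvAConsume end_ rest)
    else l :: pvALoop begin end_ rest
  termination_by ls => ls.length
  decreasing_by
    · have h := pvAConsume_len_le end_ rest
      simp only [List.length_cons]; omega
    · simp

def strip_marker_blocks_py (text : String) (begin : String) (end_ : String) : String :=
  let out := pvALoop begin end_ (PySem.Str.splitlines text)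
  PySem.Str.join "\n" out ++ (if out ≠ [] then "\n" else "")

-- ===== PORT B =====
-- flat for-loop over the lines with the (inside, out) state
def pvBStep (begin end_ : String) (st : Bool × List String) (line : String) : Bool × List String :=
  if st.1 then
    (if PySem.Str.strip line == end_ then (false, st.2) else (true, st.2))
  else if PySem.Str.strip line == begin then (true, st.2)
  else (st.1, st.2 ++ [line])

def strip_marker_blocks_py_alt (text : String) (begin : String) (end_ : String) : String :=
  let out := ((PySem.Str.splitlines text).foldl (pvBStep begin end_) (false, [])).2
  PySem.Str.join "\n" out ++ (if out ≠ [] then "\n" else "")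

-- ===== PRECONDITION & SPEC =====
def Spec_strip_marker_blocks_py (text : String) (begin : String) (end_ : String) (out : String) : Prop := out = strip_marker_blocks_py_alt text begin end_
instance (text : String) (begin : String) (end_ : String) (out : String) : Decidable (Spec_strip_marker_blocks_py text begin end_ out) := by unfold Spec_strip_marker_blocks_py; infer_instance

-- ===== CLAIM (what is proved, stated in full; the proofs are below) =====
def Claim_equal_strip_marker_blocks_py : Prop := ∀ (text : String) (begin : String) (end_ : String), Dom_strip_marker_blocks_py text begin end_ → Spec_strip_marker_blocks_py text begin end_ (strip_marker_blocks_py text begin end_)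

-- ===== LEMMAS AND PROOFS =====

-- recursive view of B's fold
def pvBRec (begin end_ : String) : Bool → List String → List String
  | _, [] => []
  | true, l :: rest =>
      if PySem.Str.strip l == end_ then pvBRec begin end_ false rest
      else pvBRec begin end_ true rest
  | false, l :: rest =>
      if PySem.Str.strip l == begin then pvBRec begin end_ true rest
      else l :: pvBRec begin end_ false rest

theorem pvBFold_eq (begin end_ : String) (lines : List String) :
    ∀ (inside : Bool) (out : List String),
      (lines.foldl (pvBStep begin end_) (inside, out)).2 = out ++ pvBRec begin end_ inside lines := by
  induction lines with
  | nil => intro inside out; simp [pvBRec]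
  | cons l rest ih =>
    intro inside out
    cases inside with
    | true =>
      by_cases h : PySem.Str.strip l = end_ <;> simp [pvBStep, pvBRec, h, ih]
    | false =>
      by_cases h : PySem.Str.strip l = begin <;> simp [pvBStep, pvBRec, h, ih]

-- skipping to past the end marker equals running pvBRec in the inside state
theorem pvBRec_true_eq (begin end_ : String) (rest : List String) :
    pvBRec begin end_ true rest
      = pvBRec begin end_ false (pvAConsume end_ rest) := by
  induction rest with
  | nil => simp [pvAConsume, pvAInner, pvBRec]
  | cons l rest ih =>
    by_cases h : PySem.Str.strip l == end_
    · simp [pvAConsume, pvAInner, pvBRec, h]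
    · simp [pvAConsume, pvAInner, pvBRec, h, ih]

theorem pvALoop_eq_pvBRec (begin end_ : String) (lines : List String) :
    pvALoop begin end_ lines = pvBRec begin end_ false lines := by
  induction lines using pvALoop.induct (begin := begin) (end_ := end_) with
  | case1 => simp [pvALoop, pvBRec]
  | case2 l rest h ih =>
    rw [pvALoop, if_pos h, ih, pvBRec, if_pos h, pvBRec_true_eq]
  | case3 l rest h ih =>
    rw [pvALoop, if_neg h, ih, pvBRec, if_neg h]

-- ===== VERDICT (by name: the statement is the Claim_ definition above) =====
theorem strip_marker_blocks_py_spec : Claim_equal_strip_marker_blocks_py := by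
  intro text begin end_ _
  unfold Spec_strip_marker_blocks_py strip_marker_blocks_py strip_marker_blocks_py_alt
  rw [pvBFold_eq, List.nil_append, pvALoop_eq_pvBRec]
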